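-- pv_equiv track=rewrite | github.com/brianr01/Rubiks_Cube_Robot | visual_recognition/get_cube_pieces.py | return_proper_order
-- ===== SOURCE A (Python) =====
-- proper_order = 'wbrgoy'
--
-- def return_proper_order(dictionary):
--     colors = ''
--     numbers = []
--     new_dictionary = {}
--     for color in proper_order:
--         for key in dictionary:
--             if dictionary[key] == color:
--                 colors += dictionary[key]
--                 numbers.append(key)
--                 new_dictionary[color] = key
--     return [colors,numbers,new_dictionary]
-- ===== SOURCE B (Python) =====
-- proper_order = 'wbrgoy'
--
-- def return_proper_order(dictionary):
--     buckets = {}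
--     for key in dictionary:
--         buckets.setdefault(dictionary[key], []).append(key)
--     colors = ''
--     numbers = []
--     new_dictionary = {}
--     for color in proper_order:
--         keys = buckets.get(color)
--         if keys:
--             colors += color * len(keys)
--             numbers += keys
--             new_dictionary[color] = keys[-1]
--     return [colors, numbers, new_dictionary]
-- ===== Notes on version B (the rewrite author's own statement) =====
-- stated objective: alternative
-- what changed: B replaces A's six full scans of the dictionary (one per color) by a single grouping pass building a color-to-keys bucket map (dict.setdefault), then reads the six buckets in the fixed color order, taking the bucket's last key for new_dictionary.
import Mathlib
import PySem

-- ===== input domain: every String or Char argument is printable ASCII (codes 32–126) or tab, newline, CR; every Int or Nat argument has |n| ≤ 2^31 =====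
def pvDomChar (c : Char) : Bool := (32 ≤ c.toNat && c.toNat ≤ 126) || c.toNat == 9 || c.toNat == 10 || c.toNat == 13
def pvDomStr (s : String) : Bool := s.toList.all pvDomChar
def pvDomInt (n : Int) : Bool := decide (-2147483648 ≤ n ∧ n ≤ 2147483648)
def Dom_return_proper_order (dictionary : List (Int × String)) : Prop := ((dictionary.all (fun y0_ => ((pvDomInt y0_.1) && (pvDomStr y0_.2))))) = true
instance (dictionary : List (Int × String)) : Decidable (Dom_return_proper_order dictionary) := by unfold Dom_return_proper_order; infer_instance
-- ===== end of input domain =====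

-- B groups the keys by color in ONE pass over the dict, then reads the six buckets in
-- fixed order, instead of A's six full scans of the dict (objective: alternative, single pass).

-- ===== PORT A =====
-- proper_order = 'wbrgoy'
def properOrder : List Char := ['w', 'b', 'r', 'g', 'o', 'y']

-- literal port of A: for each color, scan the whole dictionary; colors is kept as List Char
def return_proper_order (dictionary : List (Int × String)) : String × List Int × (List (String × Int)) :=
  let r := properOrder.foldl
    (fun st c =>
      dictionary.foldl
        (fun st kv =>
          if kv.2 == String.ofList [c] then
            (st.1 ++ kv.2.toList, st.2.1 ++ [kv.1], st.2.2.insert (String.ofList [c]) kv.1)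
          else st)
        st)
    (([] : List Char), ([] : List Int), (PySem.Dict.empty : PySem.Dict String Int))
  (String.ofList r.1, r.2.1, r.2.2.items)

-- ===== PORT B =====
-- (proper_order is the same module-level constant, shared with port A)
-- literal port of B: one grouping pass building value → keys buckets, then one pass over the colors
def return_proper_order_alt (dictionary : List (Int × String)) : String × List Int × (List (String × Int)) :=
  let buckets := dictionary.foldl (fun d kv => d.modify kv.2 [] (· ++ [kv.1]))
      (PySem.Dict.empty : PySem.Dict String (List Int))
  let r := properOrder.foldl
    (fun st c =>
      match buckets.getD (String.ofList [c]) [] with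
      | [] => st
      | k :: ks =>
        (st.1 ++ List.replicate (k :: ks).length c, st.2.1 ++ (k :: ks),
         st.2.2.insert (String.ofList [c]) ((k :: ks).getLast (List.cons_ne_nil _ _))))
    (([] : List Char), ([] : List Int), (PySem.Dict.empty : PySem.Dict String Int))
  (String.ofList r.1, r.2.1, r.2.2.items)

-- ===== PRECONDITION & SPEC =====
def Spec_return_proper_order (dictionary : List (Int × String)) (out : String × List Int × (List (String × Int))) : Prop := out = return_proper_order_alt dictionary
instance (dictionary : List (Int × String)) (out : String × List Int × (List (String × Int))) : Decidable (Spec_return_proper_order dictionary out) := by unfold Spec_return_proper_order; infer_instance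

-- ===== CLAIM (what is proved, stated in full; the proofs are below) =====
def Claim_equal_return_proper_order : Prop := ∀ (dictionary : List (Int × String)), Dom_return_proper_order dictionary → Spec_return_proper_order dictionary (return_proper_order dictionary)

-- ===== LEMMAS AND PROOFS =====

-- repeated insertion at one key is insertion of the last value
theorem foldl_insert_const_key (s : String) (k : Int) (ks : List Int)
    (nd : PySem.Dict String Int) :
    (k :: ks).foldl (fun d x => d.insert s x) nd
      = nd.insert s ((k :: ks).getLast (List.cons_ne_nil _ _)) := by
  induction ks generalizing k nd with
  | nil => simp [List.foldl]
  | cons k' ks ih =>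
    rw [List.foldl_cons]
    show List.foldl _ (nd.insert s k) (k' :: ks) = _
    rw [ih k' (nd.insert s k), PySem.Dict.insert_insert_self]
    rfl

-- A's inner scan for one color, characterised by the matched-key list
theorem inner_scan_eq (l : List (Int × String)) (c : Char)
    (st : List Char × List Int × PySem.Dict String Int) :
    l.foldl
      (fun st kv =>
        if kv.2 == String.ofList [c] then
          (st.1 ++ kv.2.toList, st.2.1 ++ [kv.1], st.2.2.insert (String.ofList [c]) kv.1)
        else st) st
    = (st.1 ++ List.replicate ((l.filter (fun kv => kv.2 == String.ofList [c])).map (·.1)).length c,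
       st.2.1 ++ (l.filter (fun kv => kv.2 == String.ofList [c])).map (·.1),
       ((l.filter (fun kv => kv.2 == String.ofList [c])).map (·.1)).foldl
         (fun d x => d.insert (String.ofList [c]) x) st.2.2) := by
  induction l generalizing st with
  | nil => simp
  | cons kv l ih =>
    by_cases h : kv.2 = String.ofList [c]
    · rw [List.foldl_cons, if_pos (by simpa using h), ih]
      simp [h, List.replicate_succ]
    · rw [List.foldl_cons, if_neg (by simpa using h), ih]
      simp [h]

-- B's buckets deliver exactly the matched-key list of the inner scan
theorem buckets_getD (l : List (Int × String)) (s : String) :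
    (l.foldl (fun d kv => d.modify kv.2 [] (· ++ [kv.1]))
        (PySem.Dict.empty : PySem.Dict String (List Int))).getD s []
      = (l.filter (fun kv => kv.2 == s)).map (·.1) := by
  have h : l.foldl (fun d kv => d.modify kv.2 [] (· ++ [kv.1]))
        (PySem.Dict.empty : PySem.Dict String (List Int))
      = (l.map (fun kv => (kv.2, kv.1))).foldl
          (fun d p => d.modify p.1 [] (· ++ [p.2])) PySem.Dict.empty := by
    rw [List.foldl_map]
  rw [h, PySem.Dict.getD_foldl_modify_append]
  simp [List.filter_map, Function.comp_def]

-- the two per-color steps agree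
theorem step_eq (l : List (Int × String)) (c : Char)
    (st : List Char × List Int × PySem.Dict String Int) :
    l.foldl
      (fun st kv =>
        if kv.2 == String.ofList [c] then
          (st.1 ++ kv.2.toList, st.2.1 ++ [kv.1], st.2.2.insert (String.ofList [c]) kv.1)
        else st) st
    = (match (l.foldl (fun d kv => d.modify kv.2 [] (· ++ [kv.1]))
          (PySem.Dict.empty : PySem.Dict String (List Int))).getD (String.ofList [c]) [] with
       | [] => st
       | k :: ks =>
         (st.1 ++ List.replicate (k :: ks).length c, st.2.1 ++ (k :: ks),
          st.2.2.insert (String.ofList [c]) ((k :: ks).getLast (List.cons_ne_nil _ _)))) := by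
  rw [inner_scan_eq, buckets_getD]
  cases h : (l.filter (fun kv => kv.2 == String.ofList [c])).map (·.1) with
  | nil => simp
  | cons k ks => rw [foldl_insert_const_key]

-- ===== VERDICT (by name: the statement is the Claim_ definition above) =====
theorem return_proper_order_spec : Claim_equal_return_proper_order := by
  intro dictionary _
  unfold Spec_return_proper_order return_proper_order return_proper_order_alt
  simp only [step_eq]
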